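-- pv_equiv track=rewrite | github.com/Vijayalakshmi-2023/Python | Day17/lazy_product_inventory.py | product_viewer
-- ===== SOURCE A (Python) =====
-- def product_viewer(product_iterable, page_size=5):
--     page = []
--     for product in product_iterable:
--         page.append(product)
--         if len(page) == page_size:
--             yield page
--             page = []
--     if page:
--         yield page  # Yield the last page
--     return "End of product list"
-- ===== SOURCE B (Python) =====
-- def product_viewer(product_iterable, page_size=5):
--     items = list(product_iterable)
--     for start in range(0, len(items), page_size):
--         yield items[start:start + page_size]
--     return "End of product list"
-- ===== Notes on version B (the rewrite author's own statement) =====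
-- stated objective: simpler
-- what changed: B replaces A's element-by-element accumulator with a flush-on-full-page check by a single range(0, len, page_size) loop that yields whole slices.
-- outside the precondition, e.g. on product_viewer(['a', 'b'], 0): A returns [['a', 'b']], B raises ValueError; on product_viewer(['a', 'b'], -1): A returns [['a', 'b']], B returns []
import Mathlib
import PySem

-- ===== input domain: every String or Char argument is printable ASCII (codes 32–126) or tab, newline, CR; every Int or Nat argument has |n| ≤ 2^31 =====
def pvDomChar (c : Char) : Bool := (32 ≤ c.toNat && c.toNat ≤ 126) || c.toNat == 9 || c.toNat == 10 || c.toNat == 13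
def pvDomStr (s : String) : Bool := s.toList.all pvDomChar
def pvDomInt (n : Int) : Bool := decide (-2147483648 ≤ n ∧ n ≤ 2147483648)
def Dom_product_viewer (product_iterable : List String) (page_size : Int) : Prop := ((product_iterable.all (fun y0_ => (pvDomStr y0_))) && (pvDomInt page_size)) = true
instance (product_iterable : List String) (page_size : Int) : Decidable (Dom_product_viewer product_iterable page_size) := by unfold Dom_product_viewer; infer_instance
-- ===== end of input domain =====

-- B pulls each page as one slice with a stepped range instead of A's element-by-element
-- accumulator; objective: simpler. Equivalence is about the yielded pages (the generator's
-- 'return "End of product list"' StopIteration value is not part of the ported output).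

-- ===== PORT A =====
-- A: append elements to `page`, flush when len(page) == page_size, yield a trailing partial page.
def product_viewer (product_iterable : List String) (page_size : Int) : List (List String) :=
  let s := product_iterable.foldl
    (fun (st : List (List String) × List String) product =>
      let page := st.2 ++ [product]
      if (page.length : Int) = page_size then (st.1 ++ [page], []) else (st.1, page))
    ([], [])
  if s.2 ≠ [] then s.1 ++ [s.2] else s.1

-- ===== PORT B =====
-- B: for start in range(0, len(items), page_size): yield items[start:start+page_size]
def product_viewer_alt (product_iterable : List String) (page_size : Int) : List (List String) :=
  (PySem.List.pyRange 0 (product_iterable.length : Int) page_size).map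
    (fun start => PySem.List.slice product_iterable (some start) (some (start + page_size)))

-- ===== PRECONDITION & SPEC =====
-- Pre_ excludes nonpositive page_size: a degenerate corner no caller of a pager specifies —
-- A there accidentally returns the whole input as one page while B's range(0, len, page_size)
-- raises ValueError (page_size = 0) or yields no pages (page_size < 0).
def Pre_product_viewer (product_iterable : List String) (page_size : Int) : Prop :=
  0 < page_size ∨ (product_iterable = [] ∧ page_size < 0)
instance (product_iterable : List String) (page_size : Int) : Decidable (Pre_product_viewer product_iterable page_size) := by unfold Pre_product_viewer; infer_instance
def pvWitness_product_viewer : List String × Int := (["apple", "banana", "cherry"], 2)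
def Spec_product_viewer (product_iterable : List String) (page_size : Int) (out : List (List String)) : Prop := out = product_viewer_alt product_iterable page_size
instance (product_iterable : List String) (page_size : Int) (out : List (List String)) : Decidable (Spec_product_viewer product_iterable page_size out) := by unfold Spec_product_viewer; infer_instance

-- ===== CLAIM (what is proved, stated in full; the proofs are below) =====
def Claim_equal_product_viewer : Prop := ∀ (product_iterable : List String) (page_size : Int), Dom_product_viewer product_iterable page_size → Pre_product_viewer product_iterable page_size → Spec_product_viewer product_iterable page_size (product_viewer product_iterable page_size)

-- ===== LEMMAS AND PROOFS =====

-- Chunks of size k+1, the common shape both loops produce for a positive page size.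
def pvChunks (k : Nat) : List String → List (List String)
  | [] => []
  | x :: xs => (x :: xs.take k) :: pvChunks k (xs.drop k)
  termination_by l => l.length
  decreasing_by simp

theorem pvChunks_nil (k : Nat) : pvChunks k [] = [] := by rw [pvChunks]

theorem pvChunks_cons (k : Nat) (x : String) (xs : List String) :
    pvChunks k (x :: xs) = (x :: xs.take k) :: pvChunks k (xs.drop k) := by rw [pvChunks]

theorem pvChunks_full (k : Nat) (c l : List String) (hc : c.length = k + 1) :
    pvChunks k (c ++ l) = c :: pvChunks k l := by
  cases c with
  | nil => simp at hc
  | cons x xs =>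
    have hx : xs.length = k := by simpa using hc
    rw [List.cons_append, pvChunks_cons, List.take_left' hx, List.drop_left' hx]

-- A's fold with a partial page `page` (|page| < k+1) produces acc ++ chunks of (page ++ l).
theorem pvFoldA (k : Nat) (l : List String) : ∀ (acc : List (List String)) (page : List String),
    page.length < k + 1 →
    (if (l.foldl
        (fun (st : List (List String) × List String) product =>
          let pg := st.2 ++ [product]
          if (pg.length : Int) = ((k + 1 : Nat) : Int) then (st.1 ++ [pg], []) else (st.1, pg))
        (acc, page)).2 ≠ [] then
      (l.foldl
        (fun (st : List (List String) × List String) product =>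
          let pg := st.2 ++ [product]
          if (pg.length : Int) = ((k + 1 : Nat) : Int) then (st.1 ++ [pg], []) else (st.1, pg))
        (acc, page)).1 ++ [(l.foldl
        (fun (st : List (List String) × List String) product =>
          let pg := st.2 ++ [product]
          if (pg.length : Int) = ((k + 1 : Nat) : Int) then (st.1 ++ [pg], []) else (st.1, pg))
        (acc, page)).2]
     else (l.foldl
        (fun (st : List (List String) × List String) product =>
          let pg := st.2 ++ [product]
          if (pg.length : Int) = ((k + 1 : Nat) : Int) then (st.1 ++ [pg], []) else (st.1, pg))
        (acc, page)).1) = acc ++ pvChunks k (page ++ l) := by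
  induction l with
  | nil =>
    intro acc page hlt
    cases page with
    | nil => simp [pvChunks_nil]
    | cons x xs =>
      have hx : xs.length ≤ k := by simp at hlt; omega
      simp [pvChunks_cons, List.take_of_length_le hx, List.drop_of_length_le hx, pvChunks_nil]
  | cons p l ih =>
    intro acc page hlt
    simp only [List.foldl_cons]
    by_cases h : (page ++ [p]).length = k + 1
    · have hcast : ((page ++ [p]).length : Int) = ((k + 1 : Nat) : Int) := by exact_mod_cast h
      rw [if_pos hcast]
      rw [ih (acc ++ [page ++ [p]]) [] (by simp)]
      simp only [List.nil_append]
      rw [show page ++ p :: l = (page ++ [p]) ++ l by simp, pvChunks_full k (page ++ [p]) l h]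
      simp
    · have hcast : ¬ ((page ++ [p]).length : Int) = ((k + 1 : Nat) : Int) :=
        fun hc => h (by exact_mod_cast hc)
      have hlen : (page ++ [p]).length < k + 1 := by
        have : (page ++ [p]).length = page.length + 1 := by simp
        omega
      rw [if_neg hcast]
      rw [ih acc (page ++ [p]) hlen, show page ++ p :: l = (page ++ [p]) ++ l by simp]

-- pyRange with a positive step peels its first element.
theorem pvRange_cons (a b n : Int) (hn : 0 < n) (hab : a < b) :
    PySem.List.pyRange a b n = a :: PySem.List.pyRange (a + n) b n := by
  rw [PySem.List.pyRange_of_pos a b hn, PySem.List.pyRange_of_pos (a + n) b hn]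
  have hc : (if a < b then ((b - a + n - 1) / n).toNat else 0)
      = (if a + n < b then ((b - (a + n) + n - 1) / n).toNat else 0) + 1 := by
    rw [if_pos hab]
    have h1 : b - a + n - 1 = (b - a - 1) + 1 * n := by ring
    have h2 : (b - a + n - 1) / n = (b - a - 1) / n + 1 := by
      rw [h1, Int.add_mul_ediv_right _ _ (by omega)]
    have h3 : 0 ≤ (b - a - 1) / n := Int.ediv_nonneg (by omega) (by omega)
    by_cases hb : a + n < b
    · rw [if_pos hb]
      have he : b - (a + n) + n - 1 = b - a - 1 := by ring
      rw [he, h2]; omega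
    · rw [if_neg hb]
      have he : (b - a - 1) / n = 0 := Int.ediv_eq_zero_of_lt (by omega) (by omega)
      rw [h2, he]; omega
  rw [hc, List.range_succ_eq_map]
  simp only [List.map_cons, List.map_map, Nat.cast_zero, mul_zero, add_zero]
  refine congrArg₂ List.cons rfl ?_
  exact List.map_congr_left (fun j _ => by
    simp only [Function.comp_apply, Nat.succ_eq_add_one]; push_cast; ring)

theorem pvRange_nil (a b n : Int) (hn : 0 < n) (hab : b ≤ a) :
    PySem.List.pyRange a b n = [] := by
  rw [PySem.List.pyRange_of_pos a b hn, if_neg (by omega)]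
  simp

-- B's mapped range starting at a ≥ 0 produces the chunks of the dropped suffix.
theorem pvFoldB (L : List String) (k : Nat) : ∀ (m : Nat) (a : Int), 0 ≤ a →
    L.length - a.toNat ≤ m →
    (PySem.List.pyRange a (L.length : Int) ((k + 1 : Nat) : Int)).map
      (fun start => PySem.List.slice L (some start) (some (start + ((k + 1 : Nat) : Int))))
      = pvChunks k (L.drop a.toNat) := by
  intro m
  have hpos : (0 : Int) < ((k + 1 : Nat) : Int) := by exact_mod_cast Nat.succ_pos k
  induction m with
  | zero =>
    intro a ha hm
    rw [pvRange_nil _ _ _ hpos (by omega)]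
    rw [List.drop_of_length_le (by omega)]
    simp [pvChunks_nil]
  | succ m ih =>
    intro a ha hm
    by_cases hab : a < (L.length : Int)
    · rw [pvRange_cons _ _ _ hpos hab]
      simp only [List.map_cons]
      rw [ih (a + ((k + 1 : Nat) : Int)) (by omega) (by omega)]
      rw [PySem.List.slice_toNat _ ha (by omega)]
      have htn : (a + ((k + 1 : Nat) : Int)).toNat = a.toNat + (k + 1) := by omega
      have hto : (a + ((k + 1 : Nat) : Int)).toNat - a.toNat = k + 1 := by omega
      rw [hto, htn]
      obtain ⟨x, xs, hx⟩ : ∃ x xs, L.drop a.toNat = x :: xs := by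
        cases hdd : L.drop a.toNat with
        | nil =>
          exfalso
          have hlen := congrArg List.length hdd
          simp at hlen
          omega
        | cons x xs => exact ⟨x, xs, rfl⟩
      rw [show L.drop (a.toNat + (k + 1)) = (L.drop a.toNat).drop (k + 1) by
        rw [List.drop_drop]]
      rw [hx, pvChunks_cons]
      simp
    · rw [pvRange_nil _ _ _ hpos (by omega)]
      rw [List.drop_of_length_le (by omega)]
      simp [pvChunks_nil]

-- ===== VERDICT (by name: the statement is the Claim_ definition above) =====
theorem product_viewer_spec : Claim_equal_product_viewer := by
  intro l n _ hpre
  unfold Spec_product_viewer product_viewer product_viewer_alt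
  rcases hpre with hpos | ⟨hnil, hneg⟩
  · obtain ⟨k, hk⟩ : ∃ k : Nat, n = ((k + 1 : Nat) : Int) := ⟨n.toNat - 1, by omega⟩
    subst hk
    rw [pvFoldB l k l.length 0 (by omega) (by simp)]
    have := pvFoldA k l [] [] (by simp)
    simpa using this
  · subst hnil
    simp [PySem.List.pyRange, show ¬ ((0:Int) < n) by omega, show n ≠ 0 by omega]
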